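-- pv_equiv track=rewrite | github.com/jessica-ng/AntColony | new_ant_colony.py | cumulative_going_cities
-- ===== SOURCE A (Python) =====
-- def cumulative_going_cities(going_cities,size):
--     cum_going_cities=going_cities
--     for i in range(1,size):
--         if cum_going_cities[i]!=0:
--
--             for j in range(1,size):
--                 if i-j>-1 and cum_going_cities[i-j]!=0:
--                     index=i-j
--                     cum_going_cities[i]=cum_going_cities[index]+cum_going_cities[i]
--                     break
--     return cum_going_cities
-- ===== SOURCE B (Python) =====
-- def cumulative_going_cities(going_cities, size):
--     # Single forward pass: `last` holds the value of the nearest earlier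
--     # index (< i) whose current entry is nonzero, so no backward scan is needed.
--     last = going_cities[0] if size > 1 and going_cities[0] != 0 else None
--     for i in range(1, size):
--         v = going_cities[i]
--         if v != 0:
--             if last is not None:
--                 v = last + v
--                 going_cities[i] = v
--             if v != 0:
--                 last = v
--     return going_cities
-- ===== Notes on version B (the rewrite author's own statement) =====
-- stated objective: faster
-- what changed: Replaced A's inner backward scan for the nearest previous nonzero entry (O(n^2)) by a single forward pass that carries the last nonzero value seen so far (O(n)).
import Mathlib
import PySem

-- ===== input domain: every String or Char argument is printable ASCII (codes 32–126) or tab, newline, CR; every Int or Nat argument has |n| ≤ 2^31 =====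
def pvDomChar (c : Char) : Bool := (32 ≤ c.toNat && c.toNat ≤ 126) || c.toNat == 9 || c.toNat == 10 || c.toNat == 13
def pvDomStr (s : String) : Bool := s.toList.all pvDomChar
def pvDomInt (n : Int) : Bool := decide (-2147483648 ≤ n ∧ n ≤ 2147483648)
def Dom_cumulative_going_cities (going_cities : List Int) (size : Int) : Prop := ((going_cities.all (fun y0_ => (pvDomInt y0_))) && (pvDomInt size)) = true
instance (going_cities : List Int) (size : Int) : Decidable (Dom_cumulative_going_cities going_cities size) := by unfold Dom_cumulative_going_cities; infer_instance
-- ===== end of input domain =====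

-- B replaces A's quadratic backward scan by one forward pass carrying the last nonzero value.
-- Both A and B mutate the argument list in place in Python (the same mutation); the claim is about the returned list.

-- ===== PORT A =====
-- inner 'for j in range(1,size): if i-j>-1 and cum[i-j]!=0: cum[i]=cum[i-j]+cum[i]; break'
def cgcInner (cum : List Int) (i : Int) (js : List Int) : List Int :=
  match js with
  | [] => cum
  | j :: rest =>
    if i - j > -1 ∧ PySem.List.pyGetD cum (i - j) 0 ≠ 0 then
      PySem.List.pySetD cum i (PySem.List.pyGetD cum (i - j) 0 + PySem.List.pyGetD cum i 0)
    else cgcInner cum i rest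

def cumulative_going_cities (going_cities : List Int) (size : Int) : List Int :=
  (PySem.List.pyRange 1 size 1).foldl
    (fun cum i =>
      if PySem.List.pyGetD cum i 0 ≠ 0 then
        cgcInner cum i (PySem.List.pyRange 1 size 1)
      else cum)
    going_cities

-- ===== PORT B =====
def cgcStepB (st : List Int × Option Int) (i : Int) : List Int × Option Int :=
  let v := PySem.List.pyGetD st.1 i 0
  if v ≠ 0 then
    let p : List Int × Int :=
      match st.2 with
      | some l => (PySem.List.pySetD st.1 i (l + v), l + v)
      | none => (st.1, v)
    (p.1, if p.2 ≠ 0 then some p.2 else st.2)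
  else st

def cumulative_going_cities_alt (going_cities : List Int) (size : Int) : List Int :=
  let last0 : Option Int :=
    if 1 < size ∧ PySem.List.pyGetD going_cities 0 0 ≠ 0 then
      some (PySem.List.pyGetD going_cities 0 0)
    else none
  ((PySem.List.pyRange 1 size 1).foldl cgcStepB (going_cities, last0)).1

-- ===== PRECONDITION & SPEC =====
-- A raises IndexError exactly when size > 1 and size > len(going_cities); those inputs are excluded.
def Pre_cumulative_going_cities (going_cities : List Int) (size : Int) : Prop :=
  size ≤ going_cities.length ∨ size ≤ 1
instance (going_cities : List Int) (size : Int) : Decidable (Pre_cumulative_going_cities going_cities size) := by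
  unfold Pre_cumulative_going_cities; infer_instance

def pvWitness_cumulative_going_cities : List Int × Int := ([3, 0, 2, -2, 5], 5)

def Spec_cumulative_going_cities (going_cities : List Int) (size : Int) (out : List Int) : Prop := out = cumulative_going_cities_alt going_cities size
instance (going_cities : List Int) (size : Int) (out : List Int) : Decidable (Spec_cumulative_going_cities going_cities size out) := by unfold Spec_cumulative_going_cities; infer_instance

-- ===== CLAIM (what is proved, stated in full; the proofs are below) =====
def Claim_equal_cumulative_going_cities : Prop := ∀ (going_cities : List Int) (size : Int), Dom_cumulative_going_cities going_cities size → Pre_cumulative_going_cities going_cities size → Spec_cumulative_going_cities going_cities size (cumulative_going_cities going_cities size)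

-- ===== LEMMAS AND PROOFS =====


-- last nonzero value of a list (proof-only helper)
def lastNZ (l : List Int) : Option Int := l.reverse.find? (fun x => decide (x ≠ 0))

theorem take_set_self (l : List Int) (k : Nat) (x : Int) :
    (l.set k x).take k = l.take k := by
  apply List.ext_getElem
  · simp
  · intro i h1 h2
    simp only [List.getElem_take]
    rw [List.getElem_set_ne]
    simp at h1; omega

theorem lastNZ_take_succ (l : List Int) (k : Nat) (hk : k < l.length) :
    lastNZ (l.take (k + 1)) =
      if l[k] ≠ 0 then some l[k] else lastNZ (l.take k) := by
  rw [List.take_add_one]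
  simp only [lastNZ, List.getElem?_eq_getElem hk, Option.toList_some,
    List.reverse_append, List.reverse_cons, List.reverse_nil, List.nil_append,
    List.cons_append, List.find?_cons]
  by_cases h : l[k] = 0 <;> simp [h]

theorem cgcInner_eq (cum : List Int) (i m : Int)
    (hil : i < (cum.length : Int)) (hm : i + 1 ≤ m) :
    ∀ n : Nat, ∀ a : Int, 1 ≤ a → (m - a).toNat = n →
    cgcInner cum i (PySem.List.pyRange a m 1) =
      match lastNZ (cum.take (i - a + 1).toNat) with
      | some l => PySem.List.pySetD cum i (l + PySem.List.pyGetD cum i 0)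
      | none => cum := by
  intro n
  induction n with
  | zero =>
    intro a ha1 ha
    have hma : m ≤ a := by omega
    rw [PySem.List.pyRange_one_eq_nil hma]
    have h0 : (i - a + 1).toNat = 0 := by omega
    simp [cgcInner, lastNZ, h0]
  | succ n ih =>
    intro a ha1 ha
    have ham : a < m := by omega
    rw [PySem.List.pyRange_one_cons ham]
    show cgcInner cum i (a :: PySem.List.pyRange (a+1) m 1) = _
    rw [cgcInner]
    by_cases hai : a ≤ i
    · -- i - a ≥ 0
      have hk : (i - a).toNat < cum.length := by omega
      have hget : PySem.List.pyGetD cum (i - a) 0 = cum[(i-a).toNat] :=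
        PySem.List.pyGetD_eq_getElem cum 0 (by omega) (by omega)
      have htn : (i - a + 1).toNat = (i - a).toNat + 1 := by omega
      rw [htn, lastNZ_take_succ cum _ hk]
      by_cases hz : cum[(i-a).toNat] = 0
      · have : ¬ (i - a > -1 ∧ PySem.List.pyGetD cum (i - a) 0 ≠ 0) := by
          rw [hget]; simp [hz]
        have ih' := ih (a + 1) (by omega) (by omega : (m - (a+1)).toNat = n)
        have heq : (i - (a + 1) + 1).toNat = (i - a).toNat := by omega
        rw [heq] at ih'
        rw [if_neg this, ih']
        simp [hz]
      · have : (i - a > -1 ∧ PySem.List.pyGetD cum (i - a) 0 ≠ 0) := by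
          rw [hget]; exact ⟨by omega, hz⟩
        rw [if_pos this, hget]
        simp [hz]
    · -- a > i : guard false, prefix stays empty
      have hneg : ¬ (i - a > -1 ∧ PySem.List.pyGetD cum (i - a) 0 ≠ 0) := by
        intro h; omega
      rw [if_neg hneg, ih (a + 1) (by omega) (by omega)]
      have h1 : (i - a + 1).toNat = 0 := by omega
      have h2 : (i - (a+1) + 1).toNat = 0 := by omega
      rw [h1, h2]

def stepA (size : Int) (cum : List Int) (i : Int) : List Int :=
  if PySem.List.pyGetD cum i 0 ≠ 0 then cgcInner cum i (PySem.List.pyRange 1 size 1) else cum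

def init0 (g : List Int) (size : Int) : Option Int :=
  if 1 < size ∧ PySem.List.pyGetD g 0 0 ≠ 0 then some (PySem.List.pyGetD g 0 0) else none

theorem outer_inv (g : List Int) (size : Int) (h2 : 2 ≤ size) (hlen : size ≤ (g.length : Int)) :
    ∀ k : Nat, 1 ≤ k → (k : Int) ≤ size →
    (PySem.List.pyRange 1 (k:Int) 1).foldl (stepA size) g
        = ((PySem.List.pyRange 1 (k:Int) 1).foldl cgcStepB (g, init0 g size)).1
    ∧ ((PySem.List.pyRange 1 (k:Int) 1).foldl (stepA size) g).length = g.length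
    ∧ ((PySem.List.pyRange 1 (k:Int) 1).foldl cgcStepB (g, init0 g size)).2
        = lastNZ (((PySem.List.pyRange 1 (k:Int) 1).foldl (stepA size) g).take k) := by
  intro k
  induction k with
  | zero => intro h; omega
  | succ k ih =>
    intro _ hk1
    by_cases hk : 1 ≤ k
    · -- inductive step at index i = k
      have hcast : (((k+1 : Nat)) : Int) = (k:Int) + 1 := by push_cast; ring
      rw [hcast, PySem.List.pyRange_one_succ_right (by exact_mod_cast hk),
          List.foldl_append, List.foldl_append, List.foldl_cons, List.foldl_nil,
          List.foldl_cons, List.foldl_nil]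
      obtain ⟨e1, e2, e3⟩ := ih hk (by push_cast at hk1 ⊢; omega)
      set LA := (PySem.List.pyRange 1 (k:Int) 1).foldl (stepA size) g with hLA
      set stB := (PySem.List.pyRange 1 (k:Int) 1).foldl cgcStepB (g, init0 g size) with hstB
      have hkl : k < LA.length := by
        rw [e2]; push_cast at hk1; omega
      have hv : PySem.List.pyGetD LA (k:Int) 0 = LA[k] := by
        have := PySem.List.pyGetD_eq_getElem LA (i := (k:Int)) 0 (by omega) (by exact_mod_cast hkl)
        simpa using this
      have hInner := cgcInner_eq LA (k:Int) size (by exact_mod_cast hkl)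
          (by push_cast at hk1; omega) (size - 1).toNat 1 (by omega) (by omega)
      have htn : ((k:Int) - 1 + 1).toNat = k := by omega
      rw [htn] at hInner
      rw [hv] at hInner
      simp only [stepA, cgcStepB, ← e1, hv]
      by_cases hz : LA[k] = 0
      · -- current entry zero: both sides unchanged
        rw [if_neg (by simp [hz]), if_neg (by simp [hz])]
        exact ⟨e1, e2, by rw [e3, lastNZ_take_succ LA k hkl, if_neg (by simp [hz])]⟩
      · rw [if_pos (by simp [hz]), if_pos (by simp [hz]), hInner, ← e3]
        rcases hB : stB.2 with _ | l
        · -- no previous nonzero: A leaves the list, B records LA[k]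
          refine ⟨rfl, e2, ?_⟩
          show (if LA[k] ≠ 0 then some LA[k] else none) = lastNZ (List.take (k+1) LA)
          rw [if_pos hz, lastNZ_take_succ LA k hkl, if_pos hz]
        · -- previous nonzero l: both set index k to l + LA[k]
          have hset : PySem.List.pySetD LA (k:Int) (l + LA[k]) = LA.set k (l + LA[k]) := by
            rw [PySem.List.pySetD_of_nonneg LA _ (by omega)]
            norm_num
          simp only [hset]
          refine ⟨trivial, by simpa using e2, ?_⟩
          have hset' : (LA.set k (l + LA[k])).take (k+1) = LA.take k ++ [l + LA[k]] := by
            rw [List.take_add_one, take_set_self,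
                List.getElem?_eq_getElem (by simpa using hkl), List.getElem_set_self]
            rfl
          rw [hset']
          simp only [lastNZ, List.reverse_append, List.reverse_cons, List.reverse_nil,
            List.nil_append, List.cons_append, List.find?_cons]
          by_cases hlv : l + LA[k] = 0
          · have h4 : List.find? (fun x => !decide (x = 0)) (List.take k LA).reverse = some l := by
              have h5 := e3.symm.trans hB
              simpa [lastNZ] using h5
            simp [hlv, h4]
          · simp [hlv]
    · -- k = 0 : this is the first index; establish the base invariant at b = 1
      have hk0 : k = 0 := by omega
      subst hk0
      rw [show (((0:Nat)+1 : Nat) : Int) = 1 by norm_num, PySem.List.pyRange_one_eq_nil le_rfl]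
      simp only [List.foldl_nil]
      have hg : 0 < g.length := by omega
      have hget : PySem.List.pyGetD g 0 0 = g[0] := by
        simpa using PySem.List.pyGetD_eq_getElem g (i := 0) 0 le_rfl (by exact_mod_cast hg)
      refine ⟨trivial, trivial, ?_⟩
      show init0 g size = lastNZ (g.take (0 + 1))
      rw [init0, lastNZ_take_succ g 0 hg]
      by_cases h0 : g[0] = 0
      · simp [h0, hget, lastNZ]
      · have h1s : 1 < size := by omega
        simp [h0, hget, h1s]

-- ===== VERDICT (by name: the statement is the Claim_ definition above) =====
theorem cumulative_going_cities_spec : Claim_equal_cumulative_going_cities := by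
  intro g size _ hpre
  show cumulative_going_cities g size = cumulative_going_cities_alt g size
  by_cases hs : size ≤ 1
  · rw [cumulative_going_cities, cumulative_going_cities_alt,
        PySem.List.pyRange_one_eq_nil hs]
    simp
  · have h2 : 2 ≤ size := by omega
    have hlen : size ≤ (g.length : Int) := by
      rcases hpre with h | h
      · exact h
      · omega
    have hA : cumulative_going_cities g size
        = (PySem.List.pyRange 1 size 1).foldl (stepA size) g := rfl
    have hB : cumulative_going_cities_alt g size
        = ((PySem.List.pyRange 1 size 1).foldl cgcStepB (g, init0 g size)).1 := rfl
    have hcast : ((size.toNat : Nat) : Int) = size := by omega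
    have := (outer_inv g size h2 hlen size.toNat (by omega) (by omega)).1
    rw [hcast] at this
    rw [hA, hB, this]
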